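-- pv_equiv track=rewrite | github.com/patmorin/anagram-free2 | nonrep.py | gen_nonrep
-- ===== SOURCE A (Python) =====
-- def nonrep_suffix(s):
--     for t in range(1, len(s)//2 + 1):
--         if s[-2*t:-t] == s[-t:]:
--             return False
--     return True
--
-- def gen_nonrep(a, s, t):
--     if t == 0:
--         yield s
--         return
--     for c in a:
--         sc = s + c
--         if nonrep_suffix(sc):
--             for z in gen_nonrep(a, sc, t-1):
--                 yield z
-- ===== SOURCE B (Python) =====
-- def gen_nonrep(a, s, t):
--     # Iterative breadth-first generation (level by level) instead of recursive DFS;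
--     # the ending-square test compares prefixes of the reversed string.
--     level = [s]
--     for _ in range(t):
--         if not level:
--             break
--         nxt = []
--         for x in level:
--             for c in a:
--                 sc = x + c
--                 rc = sc[::-1]
--                 if all(rc[:k] != rc[k:2 * k] for k in range(1, len(sc) // 2 + 1)):
--                     nxt.append(sc)
--         level = nxt
--     yield from level
-- ===== Notes on version B (the rewrite author's own statement) =====
-- stated objective: alternative
-- what changed: Recursive DFS generator replaced by an iterative level-by-level (BFS) expansion with an explicit frontier list, and the ending-square test rewritten to compare prefixes of the reversed suffix instead of negative-index slices.
-- outside the precondition, e.g. on gen_nonrep('', 'x', -1): A returns [], B returns ['x']; on gen_nonrep('abc', '', -1): A does not finish within the time limit, B returns ['']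
import Mathlib
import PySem

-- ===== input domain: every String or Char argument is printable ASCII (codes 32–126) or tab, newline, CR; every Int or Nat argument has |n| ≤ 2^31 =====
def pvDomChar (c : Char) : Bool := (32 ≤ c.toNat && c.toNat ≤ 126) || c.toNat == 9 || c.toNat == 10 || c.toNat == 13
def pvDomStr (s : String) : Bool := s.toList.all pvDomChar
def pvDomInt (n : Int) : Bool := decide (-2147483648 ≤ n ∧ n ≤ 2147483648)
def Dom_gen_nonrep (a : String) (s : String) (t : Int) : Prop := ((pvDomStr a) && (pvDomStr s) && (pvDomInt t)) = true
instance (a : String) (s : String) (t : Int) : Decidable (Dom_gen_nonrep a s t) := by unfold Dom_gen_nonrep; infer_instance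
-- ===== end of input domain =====

-- B replaces A's recursive DFS generator by an iterative level-by-level (BFS) expansion and
-- tests for an ending square on prefixes of the reversed suffix; same output, same order (objective: alternative).

-- ===== PORT A =====
-- A's nonrep_suffix: for t in range(1, len(s)//2+1): if s[-2*t:-t] == s[-t:]: return False; return True
def nonrepSuffixA (s : List Char) : Bool :=
  (PySem.List.pyRange 1 (PySem.Int.floordiv (PySem.List.len s) 2 + 1) 1).all
    (fun t => !(PySem.List.slice s (some (-2*t)) (some (-t)) == PySem.List.slice s (some (-t)) none))

-- A's recursion on t (fuel = t.toNat; Pre_ restricts to 0 ≤ t, where this is exact)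
def genNonrepA (a : List Char) (s : List Char) : Nat → List (List Char)
  | 0 => [s]
  | n+1 => a.flatMap (fun c =>
      let sc := s ++ [c]
      if nonrepSuffixA sc then genNonrepA a sc n else [])

def gen_nonrep (a : String) (s : String) (t : Int) : List String :=
  (genNonrepA a.toList s.toList t.toNat).map String.ofList

-- ===== PORT B =====
-- B's test: rc = sc[::-1]; all(rc[:k] != rc[k:2*k] for k in range(1, len(sc)//2+1))
def nonrepSuffixB (sc : List Char) : Bool :=
  let rc := sc.reverse
  (PySem.List.pyRange 1 (PySem.Int.floordiv (PySem.List.len sc) 2 + 1) 1).all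
    (fun k => !(PySem.List.slice rc none (some k) == PySem.List.slice rc (some k) (some (2*k))))

-- one BFS level: nxt = [x + c for x in level for c in a if test(x + c)]
def stepB (a : List Char) (level : List (List Char)) : List (List Char) :=
  level.flatMap (fun x => a.flatMap (fun c =>
    let sc := x ++ [c]
    if nonrepSuffixB sc then [sc] else []))

def gen_nonrep_alt (a : String) (s : String) (t : Int) : List String :=
  ((PySem.List.pyRange 0 t 1).foldl
      (fun level _ => if level.isEmpty then level else stepB a.toList level)
      [s.toList]).map String.ofList

-- ===== PRECONDITION & SPEC =====
-- Pre_ excludes t < 0: there Python A recurses with t-1 and never reaches 0, so it raises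
-- RecursionError whenever the search does not die out (e.g. ("abc", "", -1)); on the remaining
-- negative-t inputs A returns [] only because every branch died (e.g. ("", "x", -1)), while B's
-- empty range(t) loop naturally returns [s]; which negative-t inputs terminate is not closed-form.
def Pre_gen_nonrep (a : String) (s : String) (t : Int) : Prop := 0 ≤ t
instance (a : String) (s : String) (t : Int) : Decidable (Pre_gen_nonrep a s t) := by
  unfold Pre_gen_nonrep; infer_instance

def pvWitness_gen_nonrep : String × String × Int := ("ab", "", 2)

def Spec_gen_nonrep (a : String) (s : String) (t : Int) (out : List String) : Prop := out = gen_nonrep_alt a s t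
instance (a : String) (s : String) (t : Int) (out : List String) : Decidable (Spec_gen_nonrep a s t out) := by unfold Spec_gen_nonrep; infer_instance

-- ===== CLAIM (what is proved, stated in full; the proofs are below) =====
def Claim_equal_gen_nonrep : Prop := ∀ (a : String) (s : String) (t : Int), Dom_gen_nonrep a s t → Pre_gen_nonrep a s t → Spec_gen_nonrep a s t (gen_nonrep a s t)

-- ===== LEMMAS AND PROOFS =====

-- `all` only depends on the predicate's values on the list
theorem all_congr_mem {α : Type} (l : List α) (f g : α → Bool)
    (h : ∀ x ∈ l, f x = g x) : l.all f = l.all g := by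
  induction l with
  | nil => rfl
  | cons a l ih => simp_all [List.all_cons]

-- the per-index equivalence of the two square tests, at a natural shift k
theorem square_slice_eq (s : List Char) (k : Nat) (h1 : 1 ≤ k) (h2 : 2*k ≤ s.length) :
    (PySem.List.slice s (some (-(2*(k:Int)))) (some (-(k:Int))) == PySem.List.slice s (some (-(k:Int))) none)
    = (PySem.List.slice s.reverse none (some (k:Int)) == PySem.List.slice s.reverse (some (k:Int)) (some (2*(k:Int)))) := by
  have e1 : PySem.List.slice s (some (-(k:Int))) none = s.drop (s.length - k) :=
    PySem.List.slice_from_neg_natCast s k h1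
  have e2 : PySem.List.slice s (some (-(2*(k:Int)))) (some (-(k:Int)))
      = (s.drop (s.length - 2*k)).take k := by
    have h2k : (-(2*(k:Int))) = (-(((2*k : Nat)):Int)) := by push_cast; ring
    rw [h2k]
    simp only [PySem.List.slice]
    rw [PySem.List.clampIdx_neg_natCast s.length (2*k) (by omega),
        PySem.List.clampIdx_neg_natCast s.length k (by omega)]
    congr 1
    omega
  have e3 : PySem.List.slice s.reverse none (some (k:Int)) = s.reverse.take k :=
    PySem.List.slice_to_natCast (xs := s.reverse) (b := k)
  have e4 : PySem.List.slice s.reverse (some (k:Int)) (some (2*(k:Int)))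
      = (s.reverse.drop k).take k := by
    have h2k : (2*(k:Int)) = (((2*k : Nat)):Int) := by push_cast; ring
    rw [h2k, PySem.List.slice_natCast]
    congr 1
    omega
  rw [e1, e2, e3, e4, List.take_reverse, List.drop_reverse, List.take_reverse]
  have r4 : (s.take (s.length - k)).drop ((s.take (s.length - k)).length - k)
      = (s.drop (s.length - 2*k)).take k := by
    have hm : (s.take (s.length - k)).length - k = s.length - 2*k := by
      simp only [List.length_take]; omega
    rw [hm, List.drop_take]
    congr 1
    omega
  rw [r4]
  rw [Bool.eq_iff_iff]
  simp only [beq_iff_eq, List.reverse_inj]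
  exact eq_comm

-- the two square-suffix tests agree
theorem nonrepSuffix_eq (s : List Char) : nonrepSuffixA s = nonrepSuffixB s := by
  unfold nonrepSuffixA nonrepSuffixB
  refine all_congr_mem _ _ _ (fun t ht => ?_)
  rw [PySem.List.mem_pyRange_one] at ht
  simp only [PySem.List.len_eq] at ht
  have hfd : PySem.Int.floordiv ((s.length : Int)) 2 = ((s.length / 2 : Nat) : Int) := by
    exact_mod_cast PySem.Int.floordiv_natCast s.length 2
  rw [hfd] at ht
  obtain ⟨h1, h2⟩ := ht
  set k : Nat := t.toNat with hk
  have htk : t = (k : Int) := by omega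
  have hk1 : 1 ≤ k := by omega
  have hk2 : 2*k ≤ s.length := by
    have : (k : Int) ≤ ((s.length / 2 : Nat) : Int) := by omega
    have := Int.ofNat_le.mp this
    omega
  rw [htk]
  have h2t : -2 * ((k:Int)) = -(2*(k:Int)) := by ring
  rw [h2t]
  rw [square_slice_eq s k hk1 hk2]

-- A's DFS over a frontier is the iterate of B's one-level step
theorem genA_eq_iterate (a : List Char) (n : Nat) (L : List (List Char)) :
    L.flatMap (fun x => genNonrepA a x n) = (stepB a)^[n] L := by
  induction n generalizing L with
  | zero => simp [genNonrepA, List.flatMap_singleton']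
  | succ n ih =>
    rw [Function.iterate_succ_apply, ← ih (stepB a L)]
    unfold stepB
    rw [List.flatMap_assoc]
    apply List.flatMap_congr
    intro x _
    simp only [genNonrepA, List.flatMap_assoc, nonrepSuffix_eq]
    apply List.flatMap_congr
    intro c _
    by_cases h : nonrepSuffixB (x ++ [c]) <;> simp [h]

-- a foldl whose body ignores the list element is an iterate
theorem foldl_const_iterate {α β : Type} (g : α → α) (l : List β) (init : α) :
    l.foldl (fun x _ => g x) init = g^[l.length] init := by
  induction l generalizing init with
  | nil => rfl
  | cons b l ih => simp [List.foldl_cons, ih, Function.iterate_succ_apply]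

theorem stepB_nil (a : List Char) : stepB a [] = [] := rfl

theorem gen_nonrep_spec : Claim_equal_gen_nonrep := by
  intro a s t _ hpre
  unfold Spec_gen_nonrep gen_nonrep gen_nonrep_alt
  congr 1
  have hbody : (fun (level : List (List Char)) (_ : Int) =>
        if level.isEmpty then level else stepB a.toList level)
      = fun level _ => stepB a.toList level := by
    funext level i
    cases level with
    | nil => simp [stepB_nil]
    | cons x l => rfl
  rw [hbody, foldl_const_iterate, PySem.List.length_pyRange_one]
  have hlen : ((t - 0).toNat) = t.toNat := by omega
  rw [hlen, ← genA_eq_iterate]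
  simp
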